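-- pv_equiv track=rewrite | github.com/sukhbinder/kon | src/kon/ui/latex.py | _balanced_groups
-- ===== SOURCE A (Python) =====
-- def _balanced_groups(s: str, start: int) -> tuple[str, int] | None:
--     if start >= len(s) or s[start] != "{":
--         return None
--     depth = 0
--     for i in range(start, len(s)):
--         if s[i] == "{":
--             depth += 1
--         elif s[i] == "}":
--             depth -= 1
--             if depth == 0:
--                 return s[start + 1 : i], i + 1
--     return None
-- ===== SOURCE B (Python) =====
-- def _skip(s, i):
--     """Return the number of characters consumed from position i up to and
--     including the '}' that closes the currently open group, or None if the
--     string ends before the group closes."""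
--     if i >= len(s):
--         return None
--     c = s[i]
--     if c == "}":
--         return 1
--     if c == "{":
--         k = _skip(s, i + 1)
--         if k is None:
--             return None
--         m = _skip(s, i + 1 + k)
--         if m is None:
--             return None
--         return 1 + k + m
--     m = _skip(s, i + 1)
--     return None if m is None else 1 + m
--
--
-- def _balanced_groups(s, start):
--     if start >= len(s) or s[start] != "{":
--         return None
--     k = _skip(s, start + 1)
--     if k is None:
--         return None
--     end = start + 1 + k
--     return s[start + 1 : end - 1], end
-- ===== Notes on version B (the rewrite author's own statement) =====
-- stated objective: alternative
-- what changed: Replaces A's flat depth-counter scan over range(start, len(s)) by a recursive-descent helper that consumes one balanced group at a time, recursing into nested groups and returning the consumed length.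
import Mathlib
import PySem

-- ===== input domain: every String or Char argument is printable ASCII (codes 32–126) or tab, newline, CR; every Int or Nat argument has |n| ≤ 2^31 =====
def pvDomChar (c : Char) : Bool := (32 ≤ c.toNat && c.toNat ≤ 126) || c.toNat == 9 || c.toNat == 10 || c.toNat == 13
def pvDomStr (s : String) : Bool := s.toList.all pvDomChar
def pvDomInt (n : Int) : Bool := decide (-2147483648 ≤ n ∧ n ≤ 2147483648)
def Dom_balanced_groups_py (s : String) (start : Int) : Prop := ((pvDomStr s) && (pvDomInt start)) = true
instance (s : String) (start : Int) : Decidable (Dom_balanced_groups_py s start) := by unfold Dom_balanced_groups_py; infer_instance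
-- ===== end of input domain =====

-- B replaces A's flat depth-counter scan by recursive descent over the nested brace
-- structure (a helper that consumes one balanced group, recursing on nested groups);
-- objective: alternative decomposition, same asymptotic cost.

-- ===== PORT A =====
-- the 'for i in range(start, len(s))' loop with the depth counter
def pvALoop (s : String) (start : Int) : List Int → Int → Option (String × Int)
  | [], _ => none
  | i :: rest, depth =>
    if PySem.Str.pyGet? s i = some '{' then pvALoop s start rest (depth + 1)
    else if PySem.Str.pyGet? s i = some '}' then
      (if depth - 1 = 0 then
        some (PySem.Str.slice s (some (start + 1)) (some i), i + 1)
      else pvALoop s start rest (depth - 1))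
    else pvALoop s start rest depth

def balanced_groups_py (s : String) (start : Int) : Option (String × Int) :=
  if start ≥ PySem.Str.len s then none
  else if PySem.Str.pyGet? s start ≠ some '{' then none
  else pvALoop s start (PySem.List.pyRange start (PySem.Str.len s) 1) 0

-- ===== PORT B =====
-- _skip: number of characters consumed from position i up to and including the '}'
-- closing the currently open group, or none if the string ends first.
-- (pvSkipFuel's first argument is a fuel counter making the recursion structural; it is
-- seeded so that it never runs out — a totality guard only, not part of the algorithm.)
def pvSkipFuel (s : String) : Nat → Int → Option Nat
  | 0, _ => none
  | fuel + 1, i =>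
    if i ≥ PySem.Str.len s then none
    else
      match PySem.Str.pyGet? s i with
      | none => none   -- Python would raise here; unreachable for -len(s) ≤ i
      | some c =>
        if c = '}' then some 1
        else if c = '{' then
          match pvSkipFuel s fuel (i + 1) with
          | none => none
          | some k =>
            match pvSkipFuel s fuel (i + 1 + (k : Int)) with
            | none => none
            | some m => some (1 + k + m)
        else
          match pvSkipFuel s fuel (i + 1) with
          | none => none
          | some m => some (1 + m)

def pvSkip (s : String) (i : Int) : Option Nat :=
  pvSkipFuel s ((PySem.Str.len s - i).toNat + 1) i

def balanced_groups_py_alt (s : String) (start : Int) : Option (String × Int) :=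
  if start ≥ PySem.Str.len s then none
  else if PySem.Str.pyGet? s start ≠ some '{' then none
  else
    match pvSkip s (start + 1) with
    | none => none
    | some k =>
      some (PySem.Str.slice s (some (start + 1)) (some (start + 1 + (k : Int) - 1)),
            start + 1 + (k : Int))

-- ===== PRECONDITION & SPEC =====
-- Pre_ excludes exactly start < -len(s), where the Python A raises IndexError on s[start]
-- (B raises there too); on every other input A returns normally.
def Pre_balanced_groups_py (s : String) (start : Int) : Prop :=
  -(PySem.Str.len s) ≤ start
instance (s : String) (start : Int) : Decidable (Pre_balanced_groups_py s start) := by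
  unfold Pre_balanced_groups_py; infer_instance

def pvWitness_balanced_groups_py : String × Int := ("", 0)

def Spec_balanced_groups_py (s : String) (start : Int) (out : Option (String × Int)) : Prop := out = balanced_groups_py_alt s start
instance (s : String) (start : Int) (out : Option (String × Int)) : Decidable (Spec_balanced_groups_py s start out) := by unfold Spec_balanced_groups_py; infer_instance

-- ===== CLAIM (what is proved, stated in full; the proofs are below) =====
def Claim_equal_balanced_groups_py : Prop := ∀ (s : String) (start : Int), Dom_balanced_groups_py s start → Pre_balanced_groups_py s start → Spec_balanced_groups_py s start (balanced_groups_py s start)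

-- ===== LEMMAS AND PROOFS =====

-- position-after form of pvSkip
def pvSkipPos (s : String) (i : Int) : Option Int :=
  (pvSkip s i).map (fun k => i + (k : Int))

-- closing d nested groups in sequence
def pvSkipN (s : String) : Nat → Int → Option Int
  | 0, i => some i
  | d + 1, i => (pvSkipPos s i).bind (pvSkipN s d)

theorem pvSkipN_add (s : String) (a b : Nat) (i : Int) :
    pvSkipN s (a + b) i = (pvSkipN s a i).bind (pvSkipN s b) := by
  induction a generalizing i with
  | zero => simp [pvSkipN]
  | succ a ih =>
    rw [show a + 1 + b = (a + b) + 1 from by omega]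
    simp only [pvSkipN, Option.bind_assoc]
    exact bind_congr fun j => ih j

theorem pvSkipN_one (s : String) (i : Int) : pvSkipN s 1 i = pvSkipPos s i := by
  simp [pvSkipN]

theorem pvSkipFuel_congr (s : String) :
    ∀ (f1 : Nat) (f2 : Nat) (i : Int), (PySem.Str.len s - i).toNat < f1 →
      (PySem.Str.len s - i).toNat < f2 → pvSkipFuel s f1 i = pvSkipFuel s f2 i := by
  intro f1
  induction f1 with
  | zero => intro f2 i h1 _; omega
  | succ f1 ih =>
    intro f2 i h1 h2
    cases f2 with
    | zero => omega
    | succ f2 =>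
      rw [pvSkipFuel, pvSkipFuel]
      by_cases hge : i ≥ PySem.Str.len s
      · rw [if_pos hge, if_pos hge]
      · rw [if_neg hge, if_neg hge]
        simp only [ge_iff_le, not_le] at hge
        cases hg : PySem.Str.pyGet? s i with
        | none => rfl
        | some c =>
          by_cases hcl : c = '}'
          · simp [hcl]
          · by_cases hop : c = '{'
            · subst hop
              simp only [if_neg hcl]
              rw [ih f2 (i + 1) (by omega) (by omega)]
              cases hk : pvSkipFuel s f2 (i + 1) with
              | none => rfl
              | some k =>
                have e2 := ih f2 (i + 1 + (k : Int)) (by omega) (by omega)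
                simp [e2]
            · simp only [if_neg hcl, if_neg hop]
              rw [ih f2 (i + 1) (by omega) (by omega)]

theorem pvSkip_eq_fuel (s : String) (f : Nat) (i : Int)
    (h : (PySem.Str.len s - i).toNat < f) : pvSkip s i = pvSkipFuel s f i := by
  rw [pvSkip]
  exact pvSkipFuel_congr s _ f i (by omega) h

theorem pvSkip_unfold (s : String) (i : Int) :
    pvSkip s i =
      if i ≥ PySem.Str.len s then none
      else
        match PySem.Str.pyGet? s i with
        | none => none
        | some c =>
          if c = '}' then some 1
          else if c = '{' then
            match pvSkip s (i + 1) with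
            | none => none
            | some k =>
              match pvSkip s (i + 1 + (k : Int)) with
              | none => none
              | some m => some (1 + k + m)
          else
            match pvSkip s (i + 1) with
            | none => none
            | some m => some (1 + m) := by
  rw [pvSkip, pvSkipFuel]
  by_cases hge : i ≥ PySem.Str.len s
  · rw [if_pos hge, if_pos hge]
  · rw [if_neg hge, if_neg hge]
    simp only [ge_iff_le, not_le] at hge
    have e1 : pvSkipFuel s ((PySem.Str.len s - i).toNat) (i + 1) = pvSkip s (i + 1) :=
      (pvSkip_eq_fuel s _ _ (by omega)).symm
    cases hg : PySem.Str.pyGet? s i with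
    | none => rfl
    | some c =>
      by_cases hcl : c = '}'
      · simp [hcl]
      · by_cases hop : c = '{'
        · subst hop
          simp only [if_neg hcl]
          rw [e1]
          cases hk : pvSkip s (i + 1) with
          | none => rfl
          | some k =>
            have e2 := (pvSkip_eq_fuel s ((PySem.Str.len s - i).toNat)
              (i + 1 + (k : Int)) (by omega)).symm
            simp at e2
            simp [e2]
        · simp only [if_neg hcl, if_neg hop]
          rw [e1]

theorem pvSkipPos_ge (s : String) (i : Int) (h : PySem.Str.len s ≤ i) :
    pvSkipPos s i = none := by
  simp at h
  rw [pvSkipPos, pvSkip_unfold]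
  simp [h]

theorem pvSkipPos_close (s : String) (i : Int) (h : ¬ PySem.Str.len s ≤ i)
    (hc : PySem.Str.pyGet? s i = some '}') :
    pvSkipPos s i = some (i + 1) := by
  simp at h hc
  rw [pvSkipPos, pvSkip_unfold]
  simp [hc, show ¬ ((s.length : Int) ≤ i) from by omega]

theorem pvSkipPos_open (s : String) (i : Int) (h : ¬ PySem.Str.len s ≤ i)
    (hc : PySem.Str.pyGet? s i = some '{') :
    pvSkipPos s i = (pvSkipPos s (i + 1)).bind (pvSkipPos s) := by
  simp at h hc
  rw [pvSkipPos, pvSkip_unfold]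
  simp only [ge_iff_le]
  rw [if_neg (show ¬ PySem.Str.len s ≤ i by simp; omega)]
  simp only [PySem.Str.pyGet?_eq, PySem.Chars.pyGet?_eq_listPyGet?, hc]
  rw [if_pos trivial]
  cases h1 : pvSkip s (i + 1) with
  | none => simp [pvSkipPos, h1]
  | some k =>
    simp only [pvSkipPos, h1]
    cases h2 : pvSkip s (i + 1 + (k : Int)) with
    | none => simp [h2]
    | some m =>
      simp [h2]
      omega

theorem pvSkipPos_other (s : String) (i : Int) (c : Char) (h : ¬ PySem.Str.len s ≤ i)
    (hc : PySem.Str.pyGet? s i = some c) (h1 : c ≠ '{') (h2 : c ≠ '}') :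
    pvSkipPos s i = pvSkipPos s (i + 1) := by
  simp at h hc
  rw [pvSkipPos, pvSkip_unfold]
  simp only [ge_iff_le]
  rw [if_neg (show ¬ PySem.Str.len s ≤ i by simp; omega)]
  simp only [PySem.Str.pyGet?_eq, PySem.Chars.pyGet?_eq_listPyGet?, hc]
  rw [if_neg h2, if_neg h1]
  cases h3 : pvSkip s (i + 1) with
  | none => simp [pvSkipPos, h3]
  | some m =>
    simp [pvSkipPos, h3]
    omega

theorem pvGet_isSome (s : String) (i : Int) (hlo : -(PySem.Str.len s) ≤ i)
    (hhi : i < PySem.Str.len s) : ∃ c, PySem.Str.pyGet? s i = some c := by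
  simp at hlo hhi
  have hL : s.toList.length = s.length := by simp
  cases hg : PySem.List.pyGet? s.toList i with
  | none =>
    have := (PySem.List.pyGet?_eq_none_iff (xs := s.toList) (i := i)).mp hg
    exact absurd (by constructor <;> omega) this
  | some c => exact ⟨c, by simp [hg]⟩

theorem pvMain (s : String) (start : Int) (m : Nat) :
    ∀ (i : Int) (d : Nat),
      (PySem.Str.len s - i).toNat ≤ m → -(PySem.Str.len s) ≤ i →
      pvALoop s start (PySem.List.pyRange i (PySem.Str.len s) 1) ((d : Int) + 1)
        = (pvSkipN s (d + 1) i).map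
            (fun e => (PySem.Str.slice s (some (start + 1)) (some (e - 1)), e)) := by
  induction m with
  | zero =>
    intro i d hm _
    have hge : PySem.Str.len s ≤ i := by omega
    rw [PySem.List.pyRange_one_eq_nil hge]
    simp [pvALoop, pvSkipN, pvSkipPos_ge s i hge]
  | succ m ih =>
    intro i d hm hlo
    by_cases hge : PySem.Str.len s ≤ i
    · rw [PySem.List.pyRange_one_eq_nil hge]
      simp [pvALoop, pvSkipN, pvSkipPos_ge s i hge]
    · have hlt : i < PySem.Str.len s := by omega
      rw [PySem.List.pyRange_one_cons hlt]
      obtain ⟨c, hc⟩ := pvGet_isSome s i hlo hlt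
      by_cases hopen : c = '{'
      · subst hopen
        rw [pvALoop, if_pos hc]
        have h1 : ((d : Int) + 1) + 1 = ((d + 1 : Nat) : Int) + 1 := by push_cast; ring
        rw [h1, ih (i + 1) (d + 1) (by omega) (by omega)]
        congr 1
        symm
        -- pvSkipN (d+1) i = pvSkipN (d+2) (i+1)
        show pvSkipN s (d + 1) i = pvSkipN s (d + 1 + 1) (i + 1)
        have e1 : pvSkipN s (d + 1) i = (pvSkipPos s i).bind (pvSkipN s d) := rfl
        rw [e1, pvSkipPos_open s i hge hc]
        have e2 : (pvSkipPos s (i + 1)).bind (pvSkipPos s) = pvSkipN s 2 (i + 1) := by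
          simp [pvSkipN, pvSkipPos]
        rw [Option.bind_assoc]
        have e3 : pvSkipN s (d + 1 + 1) (i + 1) = pvSkipN s (2 + d) (i + 1) := by
          congr 1; omega
        rw [e3, pvSkipN_add]
        rw [← e2, Option.bind_assoc]
      · by_cases hclose : c = '}'
        · subst hclose
          rw [pvALoop, if_neg (by rw [hc]; decide), if_pos hc]
          cases d with
          | zero =>
            rw [if_pos (by norm_num)]
            rw [pvSkipN_one, pvSkipPos_close s i hge hc]
            simp
          | succ e =>
            rw [if_neg (by push_cast; omega)]
            have h1 : ((e + 1 : Nat) : Int) + 1 - 1 = ((e : Int) + 1) := by push_cast; ring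
            rw [h1, ih (i + 1) e (by omega) (by omega)]
            congr 1
            symm
            show pvSkipN s (e + 1 + 1) i = pvSkipN s (e + 1) (i + 1)
            have e1 : pvSkipN s (e + 1 + 1) i = (pvSkipPos s i).bind (pvSkipN s (e + 1)) := rfl
            rw [e1, pvSkipPos_close s i hge hc]
            simp
        · rw [pvALoop, if_neg (by rw [hc]; simp [hopen]), if_neg (by rw [hc]; simp [hclose])]
          rw [ih (i + 1) d (by omega) (by omega)]
          congr 1
          symm
          show pvSkipN s (d + 1) i = pvSkipN s (d + 1) (i + 1)
          have e1 : pvSkipN s (d + 1) i = (pvSkipPos s i).bind (pvSkipN s d) := rfl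
          rw [e1, pvSkipPos_other s i c hge hc hopen hclose]
          rfl

-- ===== VERDICT (by name: the statement is the Claim_ definition above) =====
theorem balanced_groups_py_spec : Claim_equal_balanced_groups_py := by
  intro s start _ hpre
  have hp : -(PySem.Str.len s) ≤ start := hpre
  unfold Spec_balanced_groups_py balanced_groups_py balanced_groups_py_alt
  by_cases hge : start ≥ PySem.Str.len s
  · rw [if_pos hge, if_pos hge]
  · rw [if_neg hge, if_neg hge]
    have hlt : start < PySem.Str.len s := by omega
    obtain ⟨c, hc⟩ := pvGet_isSome s start hp hlt
    have hc' : PySem.List.pyGet? s.toList start = some c := by simpa using hc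
    by_cases hbrace : c = '{'
    · subst hbrace
      rw [if_neg (by simp [hc']), if_neg (by simp [hc'])]
      rw [PySem.List.pyRange_one_cons hlt]
      rw [pvALoop, if_pos hc]
      have h0 : (0 : Int) + 1 = ((0 : Nat) : Int) + 1 := by norm_num
      rw [h0, pvMain s start (PySem.Str.len s - (start + 1)).toNat (start + 1) 0
            (le_refl _) (by omega)]
      rw [pvSkipN_one]
      cases hk : pvSkip s (start + 1) with
      | none => simp [pvSkipPos, hk]
      | some k =>
        simp only [pvSkipPos, hk]
        rfl
    · rw [if_pos (by simp [hc', hbrace]), if_pos (by simp [hc', hbrace])]
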